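-- pv_equiv track=rewrite | github.com/naure/codesearch | codesearch/codesearch.py | get_ctx
-- ===== SOURCE A (Python) =====
-- def get_ctx(nodes, size=0):
--     " Get line numbers surrounding the nodes"
--     nos = set()
--     for n in nodes:
--         no = n['lineno']
--         nend = n['lineend'] or no
--         no = no or nend
--         if no:
--             nos.update(range(no - 1 - size, nend + size))
--     return sorted(nos)
-- ===== SOURCE B (Python) =====
-- def get_ctx(nodes, size=0):
--     " Get line numbers surrounding the nodes"
--     # collect surviving non-empty intervals [start, end)
--     ivs = []
--     for n in nodes:
--         no = n['lineno']
--         nend = n['lineend'] or no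
--         no = no or nend
--         if no:
--             s = no - 1 - size
--             e = nend + size
--             if s < e:
--                 ivs.append((s, e))
--     # sort by start, then sweep once merging overlapping/adjacent intervals
--     ivs.sort(key=lambda iv: iv[0])
--     merged = []
--     cur = None
--     for s, e in ivs:
--         if cur is None:
--             cur = (s, e)
--         elif s <= cur[1]:
--             cur = (cur[0], max(cur[1], e))
--         else:
--             merged.append(cur)
--             cur = (s, e)
--     if cur is not None:
--         merged.append(cur)
--     # concatenate the ranges: already sorted and duplicate-free
--     res = []
--     for s, e in merged:
--         res.extend(range(s, e))
--     return res
-- ===== Notes on version B (the rewrite author's own statement) =====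
-- stated objective: alternative
-- what changed: Replaces A's per-line hash-set accumulation plus final sort by collecting each node's (start,end) interval, sorting intervals by start, merging overlapping/adjacent ones in one sweep, and concatenating the merged ranges, which is sorted and duplicate-free by construction.
import Mathlib
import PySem

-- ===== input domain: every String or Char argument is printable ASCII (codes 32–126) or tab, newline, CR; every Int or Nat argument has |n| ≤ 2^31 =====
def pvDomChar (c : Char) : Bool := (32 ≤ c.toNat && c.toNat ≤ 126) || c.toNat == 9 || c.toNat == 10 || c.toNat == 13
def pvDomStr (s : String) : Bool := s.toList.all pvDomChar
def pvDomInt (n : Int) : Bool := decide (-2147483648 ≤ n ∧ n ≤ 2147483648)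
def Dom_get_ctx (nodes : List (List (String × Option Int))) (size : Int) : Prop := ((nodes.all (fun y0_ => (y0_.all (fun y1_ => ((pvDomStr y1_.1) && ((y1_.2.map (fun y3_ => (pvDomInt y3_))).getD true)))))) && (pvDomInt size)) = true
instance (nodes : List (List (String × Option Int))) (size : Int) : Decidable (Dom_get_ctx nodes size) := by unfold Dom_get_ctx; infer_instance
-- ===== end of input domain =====

-- B collects the per-node intervals, sorts them by start and sweeps once, merging
-- overlapping/adjacent intervals, then emits the ranges in order — replacing A's
-- element-by-element hash set + final sort (objective: alternative algorithm).

-- shared transliteration helpers (both Pythons evaluate the same per-node expressions)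
-- Python truthiness of an int-or-None value: None and 0 are falsy
def pvTruthy (o : Option Int) : Bool :=
  match o with
  | none => false
  | some k => decide (k ≠ 0)

-- n[key] on the node dict (first match); Pre_get_ctx excludes the KeyError case (missing key)
def pvLookup (n : List (String × Option Int)) (k : String) : Option Int :=
  ((n.find? (fun p => p.1 == k)).map (fun p => p.2)).getD none

-- ===== PORT A =====
def get_ctx (nodes : List (List (String × Option Int))) (size : Int) : List Int :=
  let nos : PySem.Set Int := nodes.foldl (fun nos n =>
    let no := pvLookup n "lineno"
    let nend := if pvTruthy (pvLookup n "lineend") then pvLookup n "lineend" else no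
    let no := if pvTruthy no then no else nend
    if pvTruthy no then
      PySem.Set.update nos (PySem.List.pyRange (no.getD 0 - 1 - size) (nend.getD 0 + size) 1)
    else nos) PySem.Set.empty
  PySem.List.sorted nos (fun x => x) false

-- ===== PORT B =====
def get_ctx_alt (nodes : List (List (String × Option Int))) (size : Int) : List Int :=
  let ivs : List (Int × Int) := nodes.foldl (fun ivs n =>
    let no := pvLookup n "lineno"
    let nend := if pvTruthy (pvLookup n "lineend") then pvLookup n "lineend" else no
    let no := if pvTruthy no then no else nend
    if pvTruthy no then
      let s := no.getD 0 - 1 - size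
      let e := nend.getD 0 + size
      if s < e then ivs ++ [(s, e)] else ivs
    else ivs) []
  let ivs := PySem.List.sorted ivs (fun iv => iv.1) false
  let st := ivs.foldl (fun (st : List (Int × Int) × Option (Int × Int)) iv =>
    match st.2 with
    | none => (st.1, some iv)
    | some c =>
      if iv.1 ≤ c.2 then (st.1, some (c.1, max c.2 iv.2))
      else (st.1 ++ [c], some iv)) ([], none)
  let merged := match st.2 with
    | none => st.1
    | some c => st.1 ++ [c]
  merged.foldl (fun res iv => res ++ PySem.List.pyRange iv.1 iv.2 1) []

-- ===== PRECONDITION & SPEC =====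
-- Pre_ excludes exactly the nodes missing key 'lineno' or 'lineend', on which A raises KeyError.
def Pre_get_ctx (nodes : List (List (String × Option Int))) (size : Int) : Prop :=
  ∀ n ∈ nodes, (n.find? (fun p => p.1 == "lineno")).isSome = true ∧
               (n.find? (fun p => p.1 == "lineend")).isSome = true
instance (nodes : List (List (String × Option Int))) (size : Int) : Decidable (Pre_get_ctx nodes size) := by unfold Pre_get_ctx; infer_instance
def pvWitness_get_ctx : (List (List (String × Option Int))) × Int :=
  ([[("lineno", some 2), ("lineend", some 4)], [("lineno", some 9), ("lineend", none)]], 1)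

def Spec_get_ctx (nodes : List (List (String × Option Int))) (size : Int) (out : List Int) : Prop := out = get_ctx_alt nodes size
instance (nodes : List (List (String × Option Int))) (size : Int) (out : List Int) : Decidable (Spec_get_ctx nodes size out) := by unfold Spec_get_ctx; infer_instance

-- ===== CLAIM (what is proved, stated in full; the proofs are below) =====
def Claim_equal_get_ctx : Prop := ∀ (nodes : List (List (String × Option Int))) (size : Int), Dom_get_ctx nodes size → Pre_get_ctx nodes size → Spec_get_ctx nodes size (get_ctx nodes size)

-- ===== LEMMAS AND PROOFS =====

-- the candidate interval a node contributes (the per-node preamble both ports transliterate)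
def pvCand (size : Int) (n : List (String × Option Int)) : Option (Int × Int) :=
  let no := pvLookup n "lineno"
  let nend := if pvTruthy (pvLookup n "lineend") then pvLookup n "lineend" else no
  let no := if pvTruthy no then no else nend
  if pvTruthy no then some (no.getD 0 - 1 - size, nend.getD 0 + size) else none

-- A's and B's loop bodies, in terms of pvCand
def pvStepA (size : Int) (nos : PySem.Set Int) (n : List (String × Option Int)) : PySem.Set Int :=
  match pvCand size n with
  | some iv => PySem.Set.update nos (PySem.List.pyRange iv.1 iv.2 1)
  | none => nos

def pvStepB (size : Int) (ivs : List (Int × Int)) (n : List (String × Option Int)) : List (Int × Int) :=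
  match pvCand size n with
  | some iv => if iv.1 < iv.2 then ivs ++ [iv] else ivs
  | none => ivs

-- B's merge-sweep loop body and finalisation
def pvMStep (st : List (Int × Int) × Option (Int × Int)) (iv : Int × Int) : List (Int × Int) × Option (Int × Int) :=
  match st.2 with
  | none => (st.1, some iv)
  | some c =>
    if iv.1 ≤ c.2 then (st.1, some (c.1, max c.2 iv.2))
    else (st.1 ++ [c], some iv)

def pvFinish (st : List (Int × Int) × Option (Int × Int)) : List (Int × Int) :=
  match st.2 with
  | none => st.1
  | some c => st.1 ++ [c]

-- the merge sweep, as a recursion on the sorted interval list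
def pvMG (c : Int × Int) : List (Int × Int) → List (Int × Int)
  | [] => [c]
  | iv :: l => if iv.1 ≤ c.2 then pvMG (c.1, max c.2 iv.2) l else c :: pvMG iv l

def pvMergeAll (l : List (Int × Int)) : List (Int × Int) :=
  match l with
  | [] => []
  | iv :: rest => pvMG iv rest

-- x is covered by some interval of the list
def pvCov (l : List (Int × Int)) (x : Int) : Prop := ∃ iv ∈ l, iv.1 ≤ x ∧ x < iv.2

lemma stepA_eq (size : Int) (nos : PySem.Set Int) (n : List (String × Option Int)) :
    (let no := pvLookup n "lineno"
     let nend := if pvTruthy (pvLookup n "lineend") then pvLookup n "lineend" else no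
     let no := if pvTruthy no then no else nend
     if pvTruthy no then
       PySem.Set.update nos (PySem.List.pyRange (no.getD 0 - 1 - size) (nend.getD 0 + size) 1)
     else nos)
    = pvStepA size nos n := by
  dsimp only [pvStepA, pvCand]
  split_ifs <;> rfl

lemma stepB_eq (size : Int) (ivs : List (Int × Int)) (n : List (String × Option Int)) :
    (let no := pvLookup n "lineno"
     let nend := if pvTruthy (pvLookup n "lineend") then pvLookup n "lineend" else no
     let no := if pvTruthy no then no else nend
     if pvTruthy no then
       let s := no.getD 0 - 1 - size
       let e := nend.getD 0 + size
       if s < e then ivs ++ [(s, e)] else ivs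
     else ivs)
    = pvStepB size ivs n := by
  dsimp only [pvStepB, pvCand]
  split_ifs <;> simp_all

-- A's set loop: membership
lemma memA (nodes : List (List (String × Option Int))) (size : Int) (acc : PySem.Set Int) (x : Int) :
    x ∈ nodes.foldl (pvStepA size) acc ↔ x ∈ acc ∨ pvCov (nodes.filterMap (pvCand size)) x := by
  induction nodes generalizing acc with
  | nil => simp [pvCov]
  | cons n t ih =>
    simp only [List.foldl_cons, List.filterMap_cons]
    rcases hc : pvCand size n with _ | iv
    · simp only [pvStepA, hc, ih]
    · simp only [pvStepA, hc, ih]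
      rw [PySem.Set.mem_update]
      simp only [pvCov, List.mem_cons, PySem.List.mem_pyRange_one]
      constructor
      · rintro ((hx | hr) | ⟨jv, hjv, hj⟩)
        · exact Or.inl hx
        · exact Or.inr ⟨iv, Or.inl rfl, hr⟩
        · exact Or.inr ⟨jv, Or.inr hjv, hj⟩
      · rintro (hx | ⟨jv, rfl | hjv, hj⟩)
        · exact Or.inl (Or.inl hx)
        · exact Or.inl (Or.inr hj)
        · exact Or.inr ⟨jv, hjv, hj⟩

-- A's set loop: nodup
lemma nodupA (nodes : List (List (String × Option Int))) (size : Int) (acc : PySem.Set Int)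
    (hacc : acc.Nodup) : (nodes.foldl (pvStepA size) acc).Nodup := by
  induction nodes generalizing acc with
  | nil => exact hacc
  | cons n t ih =>
    simp only [List.foldl_cons]
    apply ih
    rcases hc : pvCand size n with _ | iv
    · simpa only [pvStepA, hc] using hacc
    · simp only [pvStepA, hc]
      exact PySem.Set.nodup_update _ _ hacc
-- B's interval loop is filterMap-then-filter
lemma ivsB (nodes : List (List (String × Option Int))) (size : Int) (acc : List (Int × Int)) :
    nodes.foldl (pvStepB size) acc
    = acc ++ (nodes.filterMap (pvCand size)).filter (fun iv => decide (iv.1 < iv.2)) := by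
  induction nodes generalizing acc with
  | nil => simp
  | cons n t ih =>
    simp only [List.foldl_cons, List.filterMap_cons]
    rcases hc : pvCand size n with _ | iv
    · simp only [pvStepB, hc, ih]
    · simp only [pvStepB, hc, ih, List.filter_cons]
      by_cases hlt : iv.1 < iv.2
      · simp [hlt, ih]
      · simp [hlt, ih]

-- B's fold-with-accumulator merge equals pvMG
lemma mergeFold (l : List (Int × Int)) (m : List (Int × Int)) (c : Int × Int) :
    pvFinish (l.foldl pvMStep (m, some c)) = m ++ pvMG c l := by
  induction l generalizing m c with
  | nil => simp [pvFinish, pvMG]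
  | cons iv t ih =>
    simp only [List.foldl_cons, pvMG, pvMStep]
    split_ifs with h
    · simpa using ih m (c.1, max c.2 iv.2)
    · simpa using ih (m ++ [c]) iv

lemma mergeAll_eq (l : List (Int × Int)) :
    pvFinish (l.foldl pvMStep ([], none)) = pvMergeAll l := by
  cases l with
  | nil => rfl
  | cons iv rest =>
    simp only [List.foldl_cons, pvMergeAll]
    have h1 : pvMStep ([], none) iv = (([] : List (Int × Int)), some iv) := rfl
    rw [h1]
    simpa using mergeFold rest [] iv

-- the merge sweep: properness, separation, lower bound, coverage
lemma MG_spec (l : List (Int × Int)) (c : Int × Int) (hc : c.1 < c.2)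
    (hl : ∀ iv ∈ l, iv.1 < iv.2)
    (hs : l.Pairwise (fun a b => a.1 ≤ b.1))
    (hg : ∀ iv ∈ l, c.1 ≤ iv.1) :
    (∀ iv ∈ pvMG c l, iv.1 < iv.2) ∧
    (pvMG c l).Pairwise (fun a b => a.2 ≤ b.1) ∧
    (∀ iv ∈ pvMG c l, c.1 ≤ iv.1) ∧
    (∀ x, pvCov (pvMG c l) x ↔ (c.1 ≤ x ∧ x < c.2) ∨ pvCov l x) := by
  induction l generalizing c with
  | nil =>
    refine ⟨by simpa [pvMG] using hc, by simp [pvMG], by simp [pvMG], ?_⟩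
    intro x; simp [pvMG, pvCov]
  | cons iv t ih =>
    rcases List.pairwise_cons.mp hs with ⟨hhead, htail⟩
    by_cases h : iv.1 ≤ c.2
    · have hc' : (c.1, max c.2 iv.2).1 < (c.1, max c.2 iv.2).2 := by
        simp only; omega
      have hg' : ∀ jv ∈ t, (c.1, max c.2 iv.2).1 ≤ jv.1 := by
        intro jv hjv; exact hg jv (List.mem_cons_of_mem _ hjv)
      obtain ⟨p1, p2, p3, p4⟩ := ih (c.1, max c.2 iv.2) hc'
        (fun jv hjv => hl jv (List.mem_cons_of_mem _ hjv)) htail hg'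
      have hiv1 : c.1 ≤ iv.1 := hg iv List.mem_cons_self
      have hivp : iv.1 < iv.2 := hl iv List.mem_cons_self
      refine ⟨?_, ?_, ?_, ?_⟩
      · simpa [pvMG, h] using p1
      · simpa [pvMG, h] using p2
      · simpa [pvMG, h] using p3
      · intro x
        rw [show pvMG c (iv :: t) = pvMG (c.1, max c.2 iv.2) t by simp [pvMG, h]]
        rw [p4 x]
        simp only [pvCov, List.mem_cons]
        constructor
        · rintro (⟨h1, h2⟩ | ⟨jv, hjv, hj1, hj2⟩)
          · have h1' : c.1 ≤ x := h1
            have h2' : x < max c.2 iv.2 := h2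
            by_cases hx : x < c.2
            · exact Or.inl ⟨h1', hx⟩
            · exact Or.inr ⟨iv, Or.inl rfl, by omega, by omega⟩
          · exact Or.inr ⟨jv, Or.inr hjv, hj1, hj2⟩
        · rintro (⟨h1, h2⟩ | ⟨jv, rfl | hjv, hj1, hj2⟩)
          · exact Or.inl ⟨h1, by show x < max c.2 iv.2; omega⟩
          · exact Or.inl ⟨by omega, by omega⟩
          · exact Or.inr ⟨jv, hjv, hj1, hj2⟩
    · push_neg at h
      obtain ⟨p1, p2, p3, p4⟩ := ih iv (hl iv List.mem_cons_self)
        (fun jv hjv => hl jv (List.mem_cons_of_mem _ hjv)) htail hhead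
      have hMG : pvMG c (iv :: t) = c :: pvMG iv t := by simp [pvMG, not_le.mpr h]
      refine ⟨?_, ?_, ?_, ?_⟩
      · rw [hMG]; intro jv hjv
        rcases List.mem_cons.mp hjv with rfl | hjv
        · exact hc
        · exact p1 jv hjv
      · rw [hMG]; refine List.pairwise_cons.mpr ⟨?_, p2⟩
        intro jv hjv
        have := p3 jv hjv
        omega
      · rw [hMG]; intro jv hjv
        rcases List.mem_cons.mp hjv with rfl | hjv
        · omega
        · have h1 := p3 jv hjv
          have h2 := hg iv List.mem_cons_self
          omega
      · intro x
        rw [hMG]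
        simp only [pvCov, List.mem_cons]
        constructor
        · rintro ⟨jv, rfl | hjv, hj⟩
          · exact Or.inl hj
          · rcases (p4 x).mp ⟨jv, hjv, hj⟩ with hj' | ⟨kv, hkv, hk⟩
            · exact Or.inr ⟨iv, Or.inl rfl, hj'⟩
            · exact Or.inr ⟨kv, Or.inr hkv, hk⟩
        · rintro (hj | ⟨jv, hjv | hjv, hj⟩)
          · exact ⟨c, Or.inl rfl, hj⟩
          · subst hjv
            rcases (p4 x).mpr (Or.inl hj) with ⟨kv, hkv, hk⟩
            exact ⟨kv, Or.inr hkv, hk⟩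
          · rcases (p4 x).mpr (Or.inr ⟨jv, hjv, hj⟩) with ⟨kv, hkv, hk⟩
            exact ⟨kv, Or.inr hkv, hk⟩

-- flattening a properly separated interval list: strictly increasing
lemma flat_pairwise (M : List (Int × Int)) (hpw : M.Pairwise (fun a b => a.2 ≤ b.1)) :
    (M.flatMap (fun iv => PySem.List.pyRange iv.1 iv.2 1)).Pairwise (· < ·) := by
  rw [List.flatMap_def, List.pairwise_flatten]
  refine ⟨?_, ?_⟩
  · intro l hl
    rcases List.mem_map.mp hl with ⟨iv, _, rfl⟩
    exact PySem.List.pairwise_lt_pyRange_one iv.1 iv.2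
  · refine (List.pairwise_map).mpr (hpw.imp ?_)
    intro a b hab x hx y hy
    rw [PySem.List.mem_pyRange_one] at hx hy
    omega

lemma flat_mem (M : List (Int × Int)) (x : Int) :
    x ∈ M.flatMap (fun iv => PySem.List.pyRange iv.1 iv.2 1) ↔ pvCov M x := by
  simp [List.mem_flatMap, PySem.List.mem_pyRange_one, pvCov]

-- coverage ignores empty intervals
lemma cov_filter (l : List (Int × Int)) (x : Int) :
    pvCov (l.filter (fun iv => decide (iv.1 < iv.2))) x ↔ pvCov l x := by
  simp only [pvCov, List.mem_filter]
  constructor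
  · rintro ⟨iv, ⟨h1, _⟩, h⟩; exact ⟨iv, h1, h⟩
  · rintro ⟨iv, h1, h⟩
    exact ⟨iv, ⟨h1, by simp only [decide_eq_true_eq]; omega⟩, h⟩

-- coverage is invariant under permutation
lemma cov_perm {l l' : List (Int × Int)} (h : l.Perm l') (x : Int) : pvCov l x ↔ pvCov l' x := by
  simp only [pvCov]
  constructor <;> rintro ⟨iv, h1, h2⟩
  · exact ⟨iv, h.mem_iff.mp h1, h2⟩
  · exact ⟨iv, h.mem_iff.mpr h1, h2⟩

lemma stepA_funeq (size : Int) :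
    (fun (nos : PySem.Set Int) (n : List (String × Option Int)) =>
      let no := pvLookup n "lineno"
      let nend := if pvTruthy (pvLookup n "lineend") then pvLookup n "lineend" else no
      let no := if pvTruthy no then no else nend
      if pvTruthy no then
        PySem.Set.update nos (PySem.List.pyRange (no.getD 0 - 1 - size) (nend.getD 0 + size) 1)
      else nos)
    = pvStepA size :=
  funext fun nos => funext fun n => stepA_eq size nos n

lemma stepB_funeq (size : Int) :
    (fun (ivs : List (Int × Int)) (n : List (String × Option Int)) =>
      let no := pvLookup n "lineno"
      let nend := if pvTruthy (pvLookup n "lineend") then pvLookup n "lineend" else no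
      let no := if pvTruthy no then no else nend
      if pvTruthy no then
        let s := no.getD 0 - 1 - size
        let e := nend.getD 0 + size
        if s < e then ivs ++ [(s, e)] else ivs
      else ivs)
    = pvStepB size :=
  funext fun ivs => funext fun n => stepB_eq size ivs n

-- the two ports, rewritten through the named loop bodies
lemma getA_eq (nodes : List (List (String × Option Int))) (size : Int) :
    get_ctx nodes size
    = PySem.List.sorted (nodes.foldl (pvStepA size) PySem.Set.empty) (fun x => x) false := by
  unfold get_ctx
  rw [stepA_funeq]

lemma getB_eq (nodes : List (List (String × Option Int))) (size : Int) :
    get_ctx_alt nodes size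
    = (pvMergeAll (PySem.List.sorted (nodes.foldl (pvStepB size) []) (fun iv => iv.1) false)).flatMap
        (fun iv => PySem.List.pyRange iv.1 iv.2 1) := by
  unfold get_ctx_alt
  rw [stepB_funeq]
  change (pvFinish ((PySem.List.sorted (nodes.foldl (pvStepB size) []) (fun iv => iv.1) false).foldl
      pvMStep ([], none))).foldl (fun res iv => res ++ PySem.List.pyRange iv.1 iv.2 1) [] = _
  rw [mergeAll_eq, PySem.List.foldl_append_eq_flatMap]
  simp

-- ===== VERDICT (by name: the statement is the Claim_ definition above) =====
theorem get_ctx_spec : Claim_equal_get_ctx := by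
  intro nodes size _ _
  unfold Spec_get_ctx
  rw [getA_eq, getB_eq, ivsB nodes size []]
  simp only [List.nil_append]
  set ivsF := (nodes.filterMap (pvCand size)).filter (fun iv => decide (iv.1 < iv.2)) with hivsF
  set S := nodes.foldl (pvStepA size) PySem.Set.empty with hS
  have hSnodup : S.Nodup := nodupA nodes size _ (by simp [PySem.Set.empty])
  have hSmem : ∀ x, x ∈ S ↔ pvCov (nodes.filterMap (pvCand size)) x := by
    intro x
    rw [hS, memA]
    simp [PySem.Set.empty]
  rcases hcase : PySem.List.sorted ivsF (fun iv => iv.1) false with _ | ⟨iv0, rest⟩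
  · -- no surviving intervals: both sides are []
    have hSempty : S = [] := by
      rw [List.eq_nil_iff_forall_not_mem]
      intro y hy
      have hcov := (hSmem y).mp hy
      rw [← cov_filter, ← hivsF, ← cov_perm (PySem.List.sorted_perm ivsF (fun iv => iv.1) false),
        hcase] at hcov
      simp [pvCov] at hcov
    rw [hSempty]
    rfl
  · have hperm : (iv0 :: rest).Perm ivsF := by
      rw [← hcase]; exact PySem.List.sorted_perm _ _ _
    have hsProper : ∀ iv ∈ iv0 :: rest, iv.1 < iv.2 := by
      intro iv hiv
      have := hperm.mem_iff.mp hiv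
      rw [hivsF, List.mem_filter] at this
      simpa using this.2
    have hsPw : (iv0 :: rest).Pairwise (fun a b => a.1 ≤ b.1) := by
      rw [← hcase]; exact PySem.List.sorted_pairwise _ _
    have hcovS : ∀ x, pvCov (iv0 :: rest) x ↔ pvCov (nodes.filterMap (pvCand size)) x := by
      intro x
      rw [cov_perm hperm, hivsF, cov_filter]
    simp only [pvMergeAll]
    rcases List.pairwise_cons.mp hsPw with ⟨hhead, htail⟩
    obtain ⟨p1, p2, p3, p4⟩ := MG_spec rest iv0 (hsProper iv0 List.mem_cons_self)
      (fun jv hjv => hsProper jv (List.mem_cons_of_mem _ hjv)) htail hhead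
    have hBpw : ((pvMG iv0 rest).flatMap (fun iv => PySem.List.pyRange iv.1 iv.2 1)).Pairwise (· < ·) :=
      flat_pairwise _ p2
    have hBmem : ∀ x, x ∈ (pvMG iv0 rest).flatMap (fun iv => PySem.List.pyRange iv.1 iv.2 1) ↔ x ∈ S := by
      intro x
      rw [flat_mem, hSmem, p4 x, ← hcovS x]
      simp only [pvCov, List.mem_cons]
      constructor
      · rintro (hj | ⟨jv, hjv, hj⟩)
        · exact ⟨iv0, Or.inl rfl, hj⟩
        · exact ⟨jv, Or.inr hjv, hj⟩
      · rintro ⟨jv, rfl | hjv, hj⟩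
        · exact Or.inl hj
        · exact Or.inr ⟨jv, hjv, hj⟩
    have hBnodup : ((pvMG iv0 rest).flatMap (fun iv => PySem.List.pyRange iv.1 iv.2 1)).Nodup :=
      hBpw.imp (fun h => ne_of_lt h)
    have hperm2 : ((pvMG iv0 rest).flatMap (fun iv => PySem.List.pyRange iv.1 iv.2 1)).Perm S :=
      (List.perm_ext_iff_of_nodup hBnodup hSnodup).mpr hBmem
    apply PySem.List.sorted_eq_of_perm_of_pairwise_lt
    · exact hperm2
    · exact hBpw
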